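-- pv_equiv track=rewrite | github.com/ano4l/APSUSM | card-generator/renderer_v2.py | split_name_lines
-- ===== SOURCE A (Python) =====
-- def split_name_lines(text: str, split_after: int = 16, max_lines: int = 2) -> list:
--     """Split a long name into stable left-aligned lines for the card layout."""
--     normalized = " ".join((text or "").split())
--     if not normalized:
--         return []
--     if len(normalized) <= split_after or max_lines <= 1:
--         return [normalized]
--
--     split_at = normalized.rfind(" ", 0, split_after + 1)
--     if split_at == -1:
--         split_at = normalized.find(" ", split_after)
--     if split_at == -1:
--         return [normalized]
--
--     first = normalized[:split_at].strip()
--     remainder = normalized[split_at + 1:].strip()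
--     if not remainder:
--         return [first]
--     if max_lines == 2:
--         return [first, remainder]
--
--     return [first] + split_name_lines(remainder, split_after, max_lines - 1)
-- ===== SOURCE B (Python) =====
-- def _split_point(s: str, split_after: int) -> int:
--     """Index of the space to cut at, or -1 if none usable."""
--     cut = s.rfind(" ", 0, split_after + 1)
--     if cut == -1:
--         cut = s.find(" ", split_after)
--     return cut
--
--
-- def split_name_lines(text: str, split_after: int = 16, max_lines: int = 2) -> list:
--     """Split a long name into stable left-aligned lines for the card layout."""
--     remaining = " ".join((text or "").split())
--     if not remaining:
--         return []
--     lines = []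
--     lines_left = max_lines
--     while True:
--         if len(remaining) <= split_after or lines_left <= 1:
--             lines.append(remaining)
--             break
--         cut = _split_point(remaining, split_after)
--         if cut == -1:
--             lines.append(remaining)
--             break
--         first = remaining[:cut].strip()
--         remainder = remaining[cut + 1:].strip()
--         if not remainder:
--             lines.append(first)
--             break
--         if lines_left == 2:
--             lines.append(first)
--             lines.append(remainder)
--             break
--         lines.append(first)
--         remaining = remainder
--         lines_left -= 1
--     return lines
-- ===== Notes on version B (the rewrite author's own statement) =====
-- stated objective: alternative
-- what changed: Replaced A's recursion, which re-normalizes (re-splits and re-joins) the remainder string on every recursive call, by a single normalization up front followed by an iterative accumulator loop with a factored-out split-point helper; the equivalence proof shows the remainder of a normalized string is already normalized.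
import Mathlib
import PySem

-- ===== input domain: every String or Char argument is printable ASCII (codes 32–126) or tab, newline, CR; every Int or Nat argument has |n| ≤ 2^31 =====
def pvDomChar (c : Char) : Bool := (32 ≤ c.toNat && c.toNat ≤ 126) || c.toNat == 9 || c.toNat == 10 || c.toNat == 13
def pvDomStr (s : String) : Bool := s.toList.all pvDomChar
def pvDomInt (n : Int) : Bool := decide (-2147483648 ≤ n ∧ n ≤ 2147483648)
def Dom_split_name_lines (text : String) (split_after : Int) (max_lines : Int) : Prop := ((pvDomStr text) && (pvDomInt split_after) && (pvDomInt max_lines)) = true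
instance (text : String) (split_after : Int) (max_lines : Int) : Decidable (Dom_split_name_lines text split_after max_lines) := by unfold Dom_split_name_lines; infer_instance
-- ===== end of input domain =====

-- B replaces A's recursion (which re-normalizes the remainder on every call) by a single
-- normalization up front followed by an accumulator loop with a factored-out split-point helper ("alternative").


-- ===== PORT A =====
-- 'text or ""' is the identity on strings as far as .split() goes; ported as 'text'.
def split_name_lines (text : String) (split_after : Int) (max_lines : Int) : List String :=
  let normalized := PySem.Str.join " " (PySem.Str.split₀ text)
  if normalized = "" then []
  else if h1 : PySem.Str.len normalized ≤ split_after ∨ max_lines ≤ 1 then [normalized]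
  else
    let split_at0 := PySem.Str.rfindFrom normalized " " 0 (some (split_after + 1))
    let split_at := if split_at0 = -1 then PySem.Str.findFrom normalized " " split_after none else split_at0
    if split_at = -1 then [normalized]
    else
      let first := PySem.Str.strip (PySem.Str.slice normalized none (some split_at))
      let remainder := PySem.Str.strip (PySem.Str.slice normalized (some (split_at + 1)) none)
      if remainder = "" then [first]
      else if max_lines = 2 then [first, remainder]
      else first :: split_name_lines remainder split_after (max_lines - 1)
termination_by max_lines.toNat
decreasing_by omega

-- ===== PORT B =====
def snlSplitPoint (s : String) (split_after : Int) : Int :=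
  let cut := PySem.Str.rfindFrom s " " 0 (some (split_after + 1))
  if cut = -1 then PySem.Str.findFrom s " " split_after none else cut

def snlLoop (split_after : Int) (remaining : String) (lines_left : Int) (lines : List String) : List String :=
  if h1 : PySem.Str.len remaining ≤ split_after ∨ lines_left ≤ 1 then lines ++ [remaining]
  else
    let cut := snlSplitPoint remaining split_after
    if cut = -1 then lines ++ [remaining]
    else
      let first := PySem.Str.strip (PySem.Str.slice remaining none (some cut))
      let remainder := PySem.Str.strip (PySem.Str.slice remaining (some (cut + 1)) none)
      if remainder = "" then lines ++ [first]
      else if lines_left = 2 then lines ++ [first, remainder]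
      else snlLoop split_after remainder (lines_left - 1) (lines ++ [first])
termination_by lines_left.toNat
decreasing_by omega

def split_name_lines_alt (text : String) (split_after : Int) (max_lines : Int) : List String :=
  let remaining := PySem.Str.join " " (PySem.Str.split₀ text)
  if remaining = "" then [] else snlLoop split_after remaining max_lines []

-- ===== PRECONDITION & SPEC =====
def Spec_split_name_lines (text : String) (split_after : Int) (max_lines : Int) (out : List String) : Prop := out = split_name_lines_alt text split_after max_lines
instance (text : String) (split_after : Int) (max_lines : Int) (out : List String) : Decidable (Spec_split_name_lines text split_after max_lines out) := by unfold Spec_split_name_lines; infer_instance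

-- ===== CLAIM (what is proved, stated in full; the proofs are below) =====
def Claim_equal_split_name_lines : Prop := ∀ (text : String) (split_after : Int) (max_lines : Int), Dom_split_name_lines text split_after max_lines → Spec_split_name_lines text split_after max_lines (split_name_lines text split_after max_lines)

-- ===== LEMMAS AND PROOFS =====

-- A list of "words": each nonempty and free of whitespace characters.
def NiceL (ws : List (List Char)) : Prop :=
  ∀ w ∈ ws, w ≠ [] ∧ ∀ c ∈ w, PySem.Chars.isspace c = false

-- A char list that is the single-space join of a nice word list, i.e. already normalized.
def GoodC (l : List Char) : Prop :=
  ∃ ws, NiceL ws ∧ l = PySem.Chars.join [' '] ws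

def GoodS (s : String) : Prop := GoodC s.toList

theorem nicel_cons_rev {cur : List Char} {acc : List (List Char)}
    (hcur : ∀ c ∈ cur, PySem.Chars.isspace c = false) (hne : ¬cur.isEmpty = true)
    (hacc : NiceL acc) : NiceL (cur.reverse :: acc) := by
  intro w hw
  rcases List.mem_cons.mp hw with hw | hw
  · subst hw
    exact ⟨by simpa using fun h' => by simp [h'] at hne,
      fun c hc => hcur c (List.mem_reverse.mp hc)⟩
  · exact hacc w hw

theorem split0_go_nice (s : List Char) : ∀ (cur : List Char) (acc : List (List Char)),
    (∀ c ∈ cur, PySem.Chars.isspace c = false) → NiceL acc →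
    NiceL (PySem.Chars.split₀.go s cur acc) := by
  induction s with
  | nil =>
    intro cur acc hcur hacc
    rw [PySem.Chars.split₀.go]
    by_cases h : cur.isEmpty
    · simpa [h, NiceL] using fun w hw => hacc w hw
    · simp only [h, Bool.false_eq_true, if_false]
      intro w hw
      exact nicel_cons_rev hcur h hacc w (List.mem_reverse.mp hw)
  | cons c rest ih =>
    intro cur acc hcur hacc
    rw [PySem.Chars.split₀.go]
    by_cases hsp : PySem.Chars.isspace c
    · by_cases he : cur.isEmpty
      · simp only [hsp, he, if_true]
        exact ih [] acc (by simp) hacc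
      · simp only [hsp, he, if_true, Bool.false_eq_true, if_false]
        exact ih [] _ (by simp) (nicel_cons_rev hcur he hacc)
    · simp only [hsp, Bool.false_eq_true, if_false]
      refine ih (c :: cur) acc ?_ hacc
      intro d hd
      rcases List.mem_cons.mp hd with hd | hd
      · subst hd; simpa using hsp
      · exact hcur d hd

theorem split0_nice (cs : List Char) : NiceL (PySem.Chars.split₀ cs) :=
  split0_go_nice cs [] [] (by simp) (by simp [NiceL])

theorem split0_go_word (w : List Char) : ∀ (rest cur : List Char) (acc : List (List Char)),
    (∀ c ∈ w, PySem.Chars.isspace c = false) →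
    PySem.Chars.split₀.go (w ++ rest) cur acc = PySem.Chars.split₀.go rest (w.reverse ++ cur) acc := by
  induction w with
  | nil => intro rest cur acc _; simp
  | cons c t ih =>
    intro rest cur acc hw
    have hc : PySem.Chars.isspace c = false := hw c (by simp)
    rw [List.cons_append, PySem.Chars.split₀.go]
    simp only [hc, Bool.false_eq_true, if_false]
    rw [ih rest (c :: cur) acc (fun d hd => hw d (by simp [hd]))]
    simp

theorem split0_go_join (ws : List (List Char)) : ∀ (acc : List (List Char)), NiceL ws →
    PySem.Chars.split₀.go (PySem.Chars.join [' '] ws) [] acc = acc.reverse ++ ws := by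
  induction ws with
  | nil => intro acc _; simp [PySem.Chars.join, List.intercalate, PySem.Chars.split₀.go.eq_def]
  | cons w rest ih =>
    intro acc hws
    have hw := hws w (by simp)
    have hrev : ¬(w.reverse.isEmpty = true) := by simpa using hw.1
    cases rest with
    | nil =>
      have hj : PySem.Chars.join [' '] [w] = w := by
        simp [PySem.Chars.join, List.intercalate]
      rw [hj, ← List.append_nil w, split0_go_word w [] [] acc hw.2]
      rw [PySem.Chars.split₀.go.eq_def]
      simp only [List.append_nil, hrev, Bool.false_eq_true, if_false]
      simp
    | cons q rest' =>
      rw [PySem.Chars.join_cons_cons]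
      rw [List.append_assoc, split0_go_word w _ [] acc hw.2]
      rw [List.singleton_append, PySem.Chars.split₀.go.eq_def]
      have hsp : PySem.Chars.isspace ' ' = true := by decide
      simp only [hsp, List.append_nil, hrev, Bool.false_eq_true, if_true, if_false]
      rw [ih (w.reverse.reverse :: acc) (fun v hv => hws v (by simp [hv]))]
      simp

theorem split0_join (ws : List (List Char)) (h : NiceL ws) :
    PySem.Chars.split₀ (PySem.Chars.join [' '] ws) = ws := by
  rw [PySem.Chars.split₀, split0_go_join ws [] h]; simp

theorem normC_of_goodC {l : List Char} (h : GoodC l) :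
    PySem.Chars.join [' '] (PySem.Chars.split₀ l) = l := by
  rcases h with ⟨ws, hws, rfl⟩
  rw [split0_join ws hws]

theorem goodC_norm (l : List Char) : GoodC (PySem.Chars.join [' '] (PySem.Chars.split₀ l)) :=
  ⟨PySem.Chars.split₀ l, split0_nice l, rfl⟩

theorem join_cons_ne (w : List Char) (rest : List (List Char)) (hw : w ≠ []) :
    ∃ a t, PySem.Chars.join [' '] (w :: rest) = a :: (t : List Char) ∧ a ∈ w := by
  rcases w with _ | ⟨a, w'⟩
  · exact absurd rfl hw
  · cases rest with
    | nil => exact ⟨a, w', by simp [PySem.Chars.join, List.intercalate], by simp⟩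
    | cons q rest' =>
      refine ⟨a, w' ++ [' '] ++ PySem.Chars.join [' '] (q :: rest'), ?_, by simp⟩
      rw [PySem.Chars.join_cons_cons]; simp

theorem lstrip_eq_self {l : List Char} (h : ∀ c, l.head? = some c → PySem.Chars.isspace c = false) :
    PySem.Chars.lstrip l = l := by
  cases l with
  | nil => rfl
  | cons a t =>
    rw [PySem.Chars.lstrip, List.dropWhile_cons_of_neg]
    simp [h a rfl]

theorem rstrip_eq_self {l : List Char} (h : ∀ c, l.getLast? = some c → PySem.Chars.isspace c = false) :
    PySem.Chars.rstrip l = l := by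
  rw [PySem.Chars.rstrip]
  rcases hr : l.reverse with _ | ⟨a, t⟩
  · simpa using congrArg List.reverse hr.symm
  · have ha : l.getLast? = some a := by
      rw [List.getLast?_eq_head?_reverse, hr]; rfl
    rw [List.dropWhile_cons_of_neg (by simp [h a ha])]
    rw [← hr]; simp

theorem join_getLast_nonspace (ws : List (List Char)) (hws : NiceL ws) :
    ∀ c, (PySem.Chars.join [' '] ws).getLast? = some c → PySem.Chars.isspace c = false := by
  induction ws with
  | nil => intro c hc; simp [PySem.Chars.join, List.intercalate] at hc
  | cons w rest ih =>
    intro c hc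
    cases rest with
    | nil =>
      have : PySem.Chars.join [' '] [w] = w := by simp [PySem.Chars.join, List.intercalate]
      rw [this] at hc
      exact (hws w (by simp)).2 c (List.mem_of_getLast? hc)
    | cons q rest' =>
      rw [PySem.Chars.join_cons_cons] at hc
      have hne : PySem.Chars.join [' '] (q :: rest') ≠ [] := by
        rcases join_cons_ne q rest' (hws q (by simp)).1 with ⟨a, t, he, _⟩
        simp [he]
      rw [List.append_assoc, List.getLast?_append_of_ne_nil _ (by simp)] at hc
      rw [List.getLast?_append_of_ne_nil _ hne] at hc
      exact ih (fun v hv => hws v (by simp [hv])) c hc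

theorem strip_join (ws : List (List Char)) (hws : NiceL ws) :
    PySem.Chars.strip (PySem.Chars.join [' '] ws) = PySem.Chars.join [' '] ws := by
  rw [PySem.Chars.strip]
  rw [lstrip_eq_self ?hh]
  case hh =>
    intro c hc
    cases ws with
    | nil => simp [PySem.Chars.join, List.intercalate] at hc
    | cons w rest =>
      rcases join_cons_ne w rest (hws w (by simp)).1 with ⟨a, t, he, ham⟩
      rw [he] at hc
      simp only [List.head?_cons, Option.some_inj] at hc
      exact hc ▸ (hws w (by simp)).2 a ham
  exact rstrip_eq_self (join_getLast_nonspace ws hws)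

theorem nice_drop {w : List Char} (hw : ∀ c ∈ w, PySem.Chars.isspace c = false) (k : Nat)
    (hne : w.drop k ≠ []) : NiceL [w.drop k] := by
  intro v hv
  rcases List.mem_singleton.mp hv with rfl
  exact ⟨hne, fun c hc => hw c (List.mem_of_mem_drop hc)⟩

theorem drop_join_shape (ws : List (List Char)) : ∀ (k : Nat), NiceL ws →
    (∃ us, NiceL us ∧ List.drop k (PySem.Chars.join [' '] ws) = PySem.Chars.join [' '] us) ∨
    (∃ us, NiceL us ∧ us ≠ [] ∧
      List.drop k (PySem.Chars.join [' '] ws) = ' ' :: PySem.Chars.join [' '] us) := by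
  induction ws with
  | nil =>
    intro k _
    left
    exact ⟨[], by simp [NiceL], by simp [PySem.Chars.join, List.intercalate]⟩
  | cons w rest ih =>
    intro k hws
    have hw := hws w (by simp)
    have hrest : NiceL rest := fun v hv => hws v (by simp [hv])
    cases rest with
    | nil =>
      have hj : PySem.Chars.join [' '] [w] = w := by simp [PySem.Chars.join, List.intercalate]
      rw [hj]
      by_cases hne : w.drop k = []
      · left; exact ⟨[], by simp [NiceL], by simp [hne, PySem.Chars.join, List.intercalate]⟩
      · left
        exact ⟨[w.drop k], nice_drop hw.2 k hne,
          by simp [PySem.Chars.join, List.intercalate]⟩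
    | cons q rest' =>
      rw [PySem.Chars.join_cons_cons, List.append_assoc, List.singleton_append]
      by_cases hk : k ≤ w.length
      · rw [List.drop_append_of_le_length hk]
        by_cases hne : w.drop k = []
        · right
          exact ⟨q :: rest', hrest, by simp, by simp [hne]⟩
        · left
          refine ⟨w.drop k :: q :: rest', ?_, ?_⟩
          · intro v hv
            rcases List.mem_cons.mp hv with rfl | hv
            · exact (nice_drop hw.2 k hne) _ (by simp)
            · exact hrest v hv
          · rw [PySem.Chars.join_cons_cons]; simp
      · have hk' : k = w.length + (k - w.length) := by omega
        rw [hk', List.drop_length_add_append]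
        have hpos : 0 < k - w.length := by omega
        rcases Nat.exists_eq_add_of_lt hpos with ⟨m, hm⟩
        have : k - w.length = m + 1 := by omega
        rw [this, List.drop_succ_cons]
        exact ih m hrest

theorem goodC_strip_drop {l : List Char} (h : GoodC l) (k : Nat) :
    GoodC (PySem.Chars.strip (List.drop k l)) := by
  rcases h with ⟨ws, hws, rfl⟩
  rcases drop_join_shape ws k hws with ⟨us, hus, he⟩ | ⟨us, hus, hne, he⟩
  · rw [he, strip_join us hus]
    exact ⟨us, hus, rfl⟩
  · rw [he, PySem.Chars.strip, PySem.Chars.lstrip, List.dropWhile_cons_of_pos (by decide)]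
    rw [← PySem.Chars.lstrip, ← PySem.Chars.strip]
    rw [strip_join us hus]
    exact ⟨us, hus, rfl⟩

theorem toList_normS (s : String) :
    (PySem.Str.join " " (PySem.Str.split₀ s)).toList
      = PySem.Chars.join [' '] (PySem.Chars.split₀ s.toList) := by
  simp [PySem.Str.join, PySem.Str.split₀, List.map_map, Function.comp_def]

theorem goodS_norm (s : String) : GoodS (PySem.Str.join " " (PySem.Str.split₀ s)) := by
  rw [GoodS, toList_normS]; exact goodC_norm _

theorem normS_of_goodS {s : String} (h : GoodS s) :
    PySem.Str.join " " (PySem.Str.split₀ s) = s := by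
  apply String.toList_inj.mp
  rw [toList_normS]
  exact normC_of_goodC h

theorem goodS_remainder {s : String} (h : GoodS s) (a : Int) :
    GoodS (PySem.Str.strip (PySem.Str.slice s (some a) none)) := by
  rw [GoodS]
  have : (PySem.Str.strip (PySem.Str.slice s (some a) none)).toList
      = PySem.Chars.strip (PySem.Chars.slice s.toList (some a) none) := by
    simp [PySem.Str.strip, PySem.Str.slice]
  rw [this, PySem.Chars.slice, PySem.List.slice_some_none]
  exact goodC_strip_drop h _

theorem snlLoop_eq (sa : Int) (n : Nat) : ∀ (ml : Int), ml.toNat = n →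
    ∀ (r : String) (acc : List String), GoodS r → r ≠ "" →
    snlLoop sa r ml acc = acc ++ split_name_lines r sa ml := by
  induction n using Nat.strong_induction_on with
  | _ n ih =>
    intro ml hn r acc hg hr
    rw [snlLoop.eq_def, split_name_lines.eq_def, normS_of_goodS hg]
    simp only [snlSplitPoint]
    rw [if_neg hr]
    split_ifs with h1 h2 h3 h4 h5 h6 h7 <;>
      try rfl
    all_goals {
      have hml1 : ¬ ml ≤ 1 := fun h => h1 (Or.inr h)
      rw [ih (ml - 1).toNat (by omega) (ml - 1) rfl _ _
        (goodS_remainder hg _) (by assumption)]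
      simp
    }

theorem split_name_lines_renorm (text : String) (sa ml : Int) :
    split_name_lines text sa ml
      = split_name_lines (PySem.Str.join " " (PySem.Str.split₀ text)) sa ml := by
  conv_rhs => rw [split_name_lines.eq_def]
  rw [normS_of_goodS (goodS_norm text)]
  conv_lhs => rw [split_name_lines.eq_def]

-- ===== VERDICT (by name: the statement is the Claim_ definition above) =====
theorem split_name_lines_spec : Claim_equal_split_name_lines := by
  intro text sa ml _
  unfold Spec_split_name_lines split_name_lines_alt
  by_cases hn : PySem.Str.join " " (PySem.Str.split₀ text) = ""
  · rw [if_pos hn, split_name_lines.eq_def, if_pos hn]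
  · rw [if_neg hn, snlLoop_eq sa ml.toNat ml rfl _ [] (goodS_norm text) hn]
    rw [← split_name_lines_renorm]
    simp
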